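-- pv_equiv track=rewrite | github.com/Pierre-AmultisDev/netmonitor | risk_scoring.py | _categorize_device
-- ===== SOURCE A (Python) =====
-- from enum import IntEnum
--
-- class AssetCategory(IntEnum):
--     """Asset criticality categories."""
--     UNKNOWN = 0
--     LOW = 1           # IoT, printers, etc.
--     MEDIUM = 2        # Workstations, laptops
--     HIGH = 3          # Servers, network devices
--     CRITICAL = 4      # Domain controllers, core infrastructure
--
-- def _categorize_device(device_type: str) -> AssetCategory:
--     """Categorize device based on type."""
--     if not device_type:
--         return AssetCategory.UNKNOWN
--
--     device_lower = device_type.lower()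
--
--     # Check for critical infrastructure
--     if any(x in device_lower for x in ['domain controller', 'dc', 'active directory']):
--         return AssetCategory.CRITICAL
--
--     # Check for servers
--     if any(x in device_lower for x in ['server', 'database', 'sql', 'web server', 'mail']):
--         return AssetCategory.HIGH
--
--     # Check for workstations
--     if any(x in device_lower for x in ['workstation', 'desktop', 'laptop']):
--         return AssetCategory.MEDIUM
--
--     # Check for IoT/low priority
--     if any(x in device_lower for x in ['printer', 'camera', 'iot', 'sensor', 'smart']):
--         return AssetCategory.LOW
--
--     return AssetCategory.UNKNOWN
-- ===== SOURCE B (Python) =====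
-- from enum import IntEnum
--
-- class AssetCategory(IntEnum):
--     """Asset criticality categories."""
--     UNKNOWN = 0
--     LOW = 1
--     MEDIUM = 2
--     HIGH = 3
--     CRITICAL = 4
--
-- # One flat keyword table; the result is the maximum category over all matching
-- # keywords, which equals A's first-match-in-priority-order because the priority
-- # order is exactly descending category value.
-- _KEYWORDS = [
--     ('domain controller', AssetCategory.CRITICAL),
--     ('dc', AssetCategory.CRITICAL),
--     ('active directory', AssetCategory.CRITICAL),
--     ('server', AssetCategory.HIGH),
--     ('database', AssetCategory.HIGH),
--     ('sql', AssetCategory.HIGH),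
--     ('web server', AssetCategory.HIGH),
--     ('mail', AssetCategory.HIGH),
--     ('workstation', AssetCategory.MEDIUM),
--     ('desktop', AssetCategory.MEDIUM),
--     ('laptop', AssetCategory.MEDIUM),
--     ('printer', AssetCategory.LOW),
--     ('camera', AssetCategory.LOW),
--     ('iot', AssetCategory.LOW),
--     ('sensor', AssetCategory.LOW),
--     ('smart', AssetCategory.LOW),
-- ]
--
-- def _categorize_device(device_type: str) -> AssetCategory:
--     """Categorize device based on type."""
--     device_lower = (device_type or '').lower()
--     return AssetCategory(max(
--         (cat for kw, cat in _KEYWORDS if kw in device_lower),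
--         default=AssetCategory.UNKNOWN,
--     ))
-- ===== Notes on version B (the rewrite author's own statement) =====
-- stated objective: simpler
-- what changed: Replaces the four hand-ordered if/any chains with one flat (keyword, category) table scanned once, returning the maximum matching category (valid because priority order equals descending category value).
import Mathlib
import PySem

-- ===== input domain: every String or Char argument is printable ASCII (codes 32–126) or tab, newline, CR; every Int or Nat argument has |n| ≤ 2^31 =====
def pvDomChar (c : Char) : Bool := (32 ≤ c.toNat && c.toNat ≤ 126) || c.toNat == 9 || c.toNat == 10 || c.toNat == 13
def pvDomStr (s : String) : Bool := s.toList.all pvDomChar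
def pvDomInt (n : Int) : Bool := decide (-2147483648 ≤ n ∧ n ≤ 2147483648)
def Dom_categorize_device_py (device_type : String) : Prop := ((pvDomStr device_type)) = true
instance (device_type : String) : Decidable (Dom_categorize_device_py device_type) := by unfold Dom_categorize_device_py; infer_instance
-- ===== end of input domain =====

-- B replaces A's four ordered if/any chains by one flat keyword table folded to the
-- maximum matching category (simpler); equal because priority order = descending value.

-- ===== PORT A =====
def categorize_device_py (device_type : String) : Int :=
  if device_type = "" then 0
  else
    let device_lower := PySem.Str.lower device_type
    if ["domain controller", "dc", "active directory"].any
        (fun x => PySem.Str.isIn x device_lower) then 4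
    else if ["server", "database", "sql", "web server", "mail"].any
        (fun x => PySem.Str.isIn x device_lower) then 3
    else if ["workstation", "desktop", "laptop"].any
        (fun x => PySem.Str.isIn x device_lower) then 2
    else if ["printer", "camera", "iot", "sensor", "smart"].any
        (fun x => PySem.Str.isIn x device_lower) then 1
    else 0

-- ===== PORT B =====
def pvKeywordTable : List (String × Int) :=
  [("domain controller", 4), ("dc", 4), ("active directory", 4),
   ("server", 3), ("database", 3), ("sql", 3), ("web server", 3), ("mail", 3),
   ("workstation", 2), ("desktop", 2), ("laptop", 2),
   ("printer", 1), ("camera", 1), ("iot", 1), ("sensor", 1), ("smart", 1)]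

def categorize_device_py_alt (device_type : String) : Int :=
  let device_lower := PySem.Str.lower device_type
  pvKeywordTable.foldl
    (fun acc kc => if PySem.Str.isIn kc.1 device_lower then max acc kc.2 else acc) 0

-- ===== PRECONDITION & SPEC =====
def Spec_categorize_device_py (device_type : String) (out : Int) : Prop := out = categorize_device_py_alt device_type
instance (device_type : String) (out : Int) : Decidable (Spec_categorize_device_py device_type out) := by unfold Spec_categorize_device_py; infer_instance

-- ===== CLAIM (what is proved, stated in full; the proofs are below) =====
def Claim_equal_categorize_device_py : Prop := ∀ (device_type : String), Dom_categorize_device_py device_type → Spec_categorize_device_py device_type (categorize_device_py device_type)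

-- ===== LEMMAS AND PROOFS =====

-- Folding a group of keywords that share one category value is "if any matched,
-- max the accumulator with that value".
lemma pv_group (v : Int) (bs : List Bool) : ∀ (acc : Int),
    (bs.map (fun b => (b, v))).foldl (fun acc p => if p.1 then max acc p.2 else acc) acc
    = if bs.any id then max acc v else acc := by
  induction bs with
  | nil => simp
  | cons b t ih =>
    intro acc
    cases b <;> simp [ih]

lemma pv_key (b1 b2 b3 b4 b5 b6 b7 b8 b9 b10 b11 b12 b13 b14 b15 b16 : Bool) :
    (if b1 || (b2 || (b3 || false)) then (4 : Int)
     else if b4 || (b5 || (b6 || (b7 || (b8 || false)))) then 3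
     else if b9 || (b10 || (b11 || false)) then 2
     else if b12 || (b13 || (b14 || (b15 || (b16 || false)))) then 1
     else 0)
    = [(b1, (4 : Int)), (b2, 4), (b3, 4), (b4, 3), (b5, 3), (b6, 3), (b7, 3), (b8, 3),
       (b9, 2), (b10, 2), (b11, 2), (b12, 1), (b13, 1), (b14, 1), (b15, 1),
       (b16, 1)].foldl (fun acc p => if p.1 then max acc p.2 else acc) 0 := by
  have e : ([(b1, (4 : Int)), (b2, 4), (b3, 4), (b4, 3), (b5, 3), (b6, 3), (b7, 3), (b8, 3),
       (b9, 2), (b10, 2), (b11, 2), (b12, 1), (b13, 1), (b14, 1), (b15, 1),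
       (b16, 1)] : List (Bool × Int))
      = [b1, b2, b3].map (fun b => (b, (4 : Int)))
        ++ [b4, b5, b6, b7, b8].map (fun b => (b, (3 : Int)))
        ++ [b9, b10, b11].map (fun b => (b, (2 : Int)))
        ++ [b12, b13, b14, b15, b16].map (fun b => (b, (1 : Int))) := by simp
  rw [e, List.foldl_append, List.foldl_append, List.foldl_append,
      pv_group, pv_group, pv_group, pv_group]
  simp only [List.any_cons, List.any_nil, id, Bool.or_false]
  split_ifs <;> simp_all

-- ===== VERDICT (by name: the statement is the Claim_ definition above) =====
set_option maxHeartbeats 8000000 in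
theorem categorize_device_py_spec : Claim_equal_categorize_device_py := by
  intro s _
  unfold Spec_categorize_device_py
  by_cases hs : s = ""
  · subst hs; decide
  · unfold categorize_device_py
    rw [if_neg hs]
    exact pv_key
      (PySem.Str.isIn "domain controller" (PySem.Str.lower s))
      (PySem.Str.isIn "dc" (PySem.Str.lower s))
      (PySem.Str.isIn "active directory" (PySem.Str.lower s))
      (PySem.Str.isIn "server" (PySem.Str.lower s))
      (PySem.Str.isIn "database" (PySem.Str.lower s))
      (PySem.Str.isIn "sql" (PySem.Str.lower s))
      (PySem.Str.isIn "web server" (PySem.Str.lower s))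
      (PySem.Str.isIn "mail" (PySem.Str.lower s))
      (PySem.Str.isIn "workstation" (PySem.Str.lower s))
      (PySem.Str.isIn "desktop" (PySem.Str.lower s))
      (PySem.Str.isIn "laptop" (PySem.Str.lower s))
      (PySem.Str.isIn "printer" (PySem.Str.lower s))
      (PySem.Str.isIn "camera" (PySem.Str.lower s))
      (PySem.Str.isIn "iot" (PySem.Str.lower s))
      (PySem.Str.isIn "sensor" (PySem.Str.lower s))
      (PySem.Str.isIn "smart" (PySem.Str.lower s))
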